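-- pv_equiv track=rewrite | github.com/songye38/2023_algorithm_study | 프로그래머스/unrated/120843. 공 던지기/공 던지기.py | solution
-- ===== SOURCE A (Python) =====
-- def solution(numbers, k):
--     answer = 0 #k로 트래킹
--     curr_index = 0
--     while answer != k:
--         curr_index += 2
--         if curr_index >= len(numbers):
--             curr_index = curr_index - len(numbers)
--             answer +=1
--         else:
--             answer += 1
--     curr_index -= 2
--     return numbers[curr_index]
-- ===== SOURCE B (Python) =====
-- def solution(numbers, k):
--     return numbers[2 * (k - 1) % len(numbers)]
-- ===== Notes on version B (the rewrite author's own statement) =====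
-- stated objective: faster
-- what changed: Replaces the step-by-step simulation of k throws (a while loop advancing an index by 2 with manual wraparound) by the closed-form index 2*(k-1) % len(numbers), read off in one subscript.
import Mathlib
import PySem

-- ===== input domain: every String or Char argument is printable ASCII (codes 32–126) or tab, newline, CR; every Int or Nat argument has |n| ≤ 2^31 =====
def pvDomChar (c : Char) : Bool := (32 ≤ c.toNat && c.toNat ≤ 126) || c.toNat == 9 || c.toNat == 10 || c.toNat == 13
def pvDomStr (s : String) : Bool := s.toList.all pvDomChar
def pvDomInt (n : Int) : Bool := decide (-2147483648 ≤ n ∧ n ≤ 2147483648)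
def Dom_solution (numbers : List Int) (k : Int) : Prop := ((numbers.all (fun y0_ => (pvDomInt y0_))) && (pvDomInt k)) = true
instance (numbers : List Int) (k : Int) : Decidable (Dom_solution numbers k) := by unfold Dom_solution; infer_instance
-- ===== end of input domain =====

-- B replaces A's O(k) throw-by-throw simulation with the closed-form index 2*(k-1) % len(numbers) (O(1)).


-- ===== PORT A =====
-- the while loop; `fuel = k.toNat` is exactly the number of iterations Python performs when k ≥ 0
-- (the totalising fuel guard is the only departure: Python diverges for k < 0, which Pre_ excludes)
def solutionLoopA (numbers : List Int) (k : Int) (curr : Int) (answer : Int) : Nat → Int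
  | 0 => curr
  | fuel + 1 =>
    if answer = k then curr
    else
      let c := curr + 2
      if c ≥ (numbers.length : Int) then
        solutionLoopA numbers k (c - (numbers.length : Int)) (answer + 1) fuel
      else
        solutionLoopA numbers k c (answer + 1) fuel

def solution (numbers : List Int) (k : Int) : Int :=
  let curr := solutionLoopA numbers k 0 0 k.toNat - 2
  (PySem.List.pyGet? numbers curr).getD 0    -- none = IndexError, excluded by Pre_

-- ===== PORT B =====
def solution_alt (numbers : List Int) (k : Int) : Int :=
  (PySem.List.pyGet? numbers (PySem.Int.mod (2 * (k - 1)) (numbers.length : Int))).getD 0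

-- ===== PRECONDITION & SPEC =====
-- Pre_ excludes exactly the inputs where A does not return normally: k < 0 (the while loop never
-- terminates), the empty list (IndexError), and a one-element list with k = 0 or k ≥ 3 (IndexError).
def Pre_solution (numbers : List Int) (k : Int) : Prop :=
  0 ≤ k ∧ (2 ≤ numbers.length ∨ (numbers.length = 1 ∧ 1 ≤ k ∧ k ≤ 2))
instance (numbers : List Int) (k : Int) : Decidable (Pre_solution numbers k) := by
  unfold Pre_solution; infer_instance
def pvWitness_solution : List Int × Int := ([3, 1, 4, 1, 5], 7)

def Spec_solution (numbers : List Int) (k : Int) (out : Int) : Prop := out = solution_alt numbers k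
instance (numbers : List Int) (k : Int) (out : Int) : Decidable (Spec_solution numbers k out) := by
  unfold Spec_solution; infer_instance

-- ===== CLAIM (what is proved, stated in full; the proofs are below) =====
def Claim_equal_solution : Prop := ∀ (numbers : List Int) (k : Int), Dom_solution numbers k → Pre_solution numbers k → Spec_solution numbers k (solution numbers k)

-- ===== LEMMAS AND PROOFS =====

-- Invariant of A's loop: with answer = k - fuel and 0 ≤ curr < len (len ≥ 2), the loop runs its
-- full fuel and ends at (curr + 2*fuel) mod len.
lemma solutionLoopA_closed (numbers : List Int) (k : Int) (h2 : 2 ≤ (numbers.length : Int)) :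
    ∀ (fuel : Nat) (curr : Int), 0 ≤ curr → curr < (numbers.length : Int) →
      solutionLoopA numbers k curr (k - fuel) fuel = (curr + 2 * fuel) % (numbers.length : Int) := by
  intro fuel
  induction fuel with
  | zero =>
    intro curr h0 h1
    simp only [solutionLoopA, Nat.cast_zero, mul_zero, add_zero]
    exact (Int.emod_eq_of_lt h0 h1).symm
  | succ f ih =>
    intro curr h0 h1
    have hne : k - ((f : Int) + 1) ≠ k := by omega
    rw [solutionLoopA]
    push_cast
    rw [if_neg (by omega)]
    by_cases hc : curr + 2 ≥ (numbers.length : Int)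
    · rw [if_pos hc]
      have := ih (curr + 2 - (numbers.length : Int)) (by omega) (by omega)
      have harg : k - ((f : Int) + 1) + 1 = k - (f : Int) := by ring
      rw [harg, this,
          show curr + 2 - (numbers.length : Int) + 2 * (f : Int)
             = curr + 2 * ((f : Int) + 1) + (numbers.length : Int) * (-1) by ring,
          Int.add_mul_emod_self_left]
    · rw [if_neg hc]
      have := ih (curr + 2) (by omega) (by omega)
      have harg : k - ((f : Int) + 1) + 1 = k - (f : Int) := by ring
      rw [harg, this]
      congr 1
      ring

-- ===== VERDICT (by name: the statement is the Claim_ definition above) =====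
theorem solution_spec : Claim_equal_solution := by
  intro numbers k _hdom hpre
  obtain ⟨hk, hlen⟩ := hpre
  unfold Spec_solution solution solution_alt
  rcases hlen with h2 | ⟨h1, hk1, hk2⟩
  · -- general case: len ≥ 2
    have h2' : 2 ≤ (numbers.length : Int) := by exact_mod_cast h2
    set n : Int := (numbers.length : Int) with hn
    have hkk : (k.toNat : Int) = k := by omega
    have hloop : solutionLoopA numbers k 0 0 k.toNat = 2 * k % n := by
      have hcl := solutionLoopA_closed numbers k h2' k.toNat 0 le_rfl (by omega)
      rw [show k - (k.toNat : Int) = 0 by omega] at hcl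
      rw [hcl]
      congr 1
      omega
    rw [hloop, PySem.Int.mod_eq_emod_of_pos (by omega)]
    set m : Int := 2 * k % n with hm
    have hb1 : 0 ≤ m := Int.emod_nonneg _ (by omega)
    have hb2 : m < n := Int.emod_lt_of_pos _ (by omega)
    have hcong : 2 * (k - 1) % n = (m - 2) % n := by
      have hq : m - 2 = 2 * (k - 1) + n * (-(2 * k / n)) := by
        rw [hm, Int.emod_def]; ring
      rw [hq, Int.add_mul_emod_self_left]
    rw [hcong]
    by_cases hge : 2 ≤ m
    · have h' : (m - 2) % n = m - 2 := Int.emod_eq_of_lt (by omega) (by omega)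
      rw [h']
    · have he : (m - 2) % n = m - 2 + n := by
        have hself : (m - 2 + n * 1) % n = (m - 2) % n := Int.add_mul_emod_self_left (m - 2) n 1
        rw [show m - 2 + n * 1 = m - 2 + n by ring] at hself
        rw [Int.emod_eq_of_lt (by omega) (by omega)] at hself
        exact hself.symm
      rw [he]
      -- m - 2 ∈ {-2, -1}: Python's negative index wraps to m - 2 + n
      simp only [PySem.List.pyGet?, PySem.List.pyIdx?]
      rw [if_neg (by omega), if_pos (by omega), if_pos (by omega), if_pos (by omega)]
      rw [show numbers.length - (-(m - 2)).toNat = (m - 2 + n).toNat by omega]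
  · -- len = 1, k ∈ {1, 2}: both return the single element
    rcases numbers with _ | ⟨a, _ | ⟨b, t⟩⟩ <;> simp only [List.length] at h1 <;> try omega
    interval_cases k <;>
      · simp only [show Int.toNat 1 = 1 from rfl, show Int.toNat 2 = 2 from rfl]
        norm_num [solutionLoopA, PySem.List.pyGet?, PySem.List.pyIdx?, PySem.Int.mod, Int.fmod]
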